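-- pv_equiv track=rewrite | github.com/masai1116/SHARE-seq-alignment | updateRGID_Singles_novaseq_V4.py | barcodeSet
-- ===== SOURCE A (Python) =====
-- def barcodeSet(barcode):
--     bases = "ATCGN"
--     barcodeSet = set()
--     barcodeSet.add(barcode)
--     for i, c in enumerate(barcode):
--         if c in bases:
--             for base in bases:
--                 if c != base:
--                     barcodeSet.add((barcode[:i] + base + barcode[i + 1:]))
--                     barcodeSet.add((barcode[0:5]))
--                     barcodeSet.add((barcode[1:] + base))
--                     barcodeSet.add((base + barcode[:-1]))
--     return barcodeSet
-- ===== SOURCE B (Python) =====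
-- def barcodeSet(barcode):
--     bases = "ATCGN"
--     head, left, right = barcode[:5], barcode[1:], barcode[:-1]
--
--     def variants():
--         # cursor walk over the barcode: prefix grows, rest shrinks;
--         # substitution variants are assembled from the cursor, shift
--         # variants from the hoisted left/right slices
--         prefix, rest = "", barcode
--         while rest:
--             c, rest = rest[0], rest[1:]
--             if c in bases:
--                 for b in bases.replace(c, ""):
--                     yield prefix + b + rest
--                     yield head
--                     yield left + b
--                     yield b + right
--             prefix += c
--
--     out = {barcode}
--     out.update(variants())
--     return out
-- ===== Notes on version B (the rewrite author's own statement) =====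
-- stated objective: alternative
-- what changed: A walks index positions with enumerate and rebuilds every piece by slicing barcode[:i]/barcode[i+1:] while re-adding four candidates per base inside nested loops; B is a generator over a prefix/rest cursor (no indices or per-position slicing), iterates over the alphabet with the current character removed instead of guarding inside the loop, hoists the loop-invariant head/left/right slices, and pours the whole candidate stream into the set with one update.
import Mathlib
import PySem

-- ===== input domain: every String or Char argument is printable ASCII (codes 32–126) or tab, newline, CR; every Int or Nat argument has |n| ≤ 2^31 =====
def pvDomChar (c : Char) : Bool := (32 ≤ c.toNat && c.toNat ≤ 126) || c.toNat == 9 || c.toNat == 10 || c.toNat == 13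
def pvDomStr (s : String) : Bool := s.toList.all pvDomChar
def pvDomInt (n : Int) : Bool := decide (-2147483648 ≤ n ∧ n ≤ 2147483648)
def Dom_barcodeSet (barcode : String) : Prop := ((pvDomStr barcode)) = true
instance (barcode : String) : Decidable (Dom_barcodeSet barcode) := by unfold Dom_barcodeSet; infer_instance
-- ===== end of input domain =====

-- B replaces A's index/slice enumeration and nested guarded adds by a recursive
-- prefix/rest cursor generator over a pre-filtered alphabet with the invariant
-- slices hoisted and one final set update; objective: alternative decomposition.

-- the alphabet "ATCGN" as its character list (shared constant)
def pvBases : List Char := ['A', 'T', 'C', 'G', 'N']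

-- ===== PORT A =====
def barcodeSet (barcode : String) : List String :=
  let cs := barcode.toList
  (PySem.List.enumerate cs 0).foldl
    (fun st ic =>
      if pvBases.contains ic.2 then
        pvBases.foldl
          (fun st b =>
            if ic.2 ≠ b then
              PySem.Set.add (PySem.Set.add (PySem.Set.add (PySem.Set.add st
                (String.ofList (PySem.List.slice cs none (some ic.1) ++ [b] ++
                   PySem.List.slice cs (some (ic.1 + 1)) none)))
                (String.ofList (PySem.List.slice cs (some 0) (some 5))))
                (String.ofList (PySem.List.slice cs (some 1) none ++ [b])))
                (String.ofList ([b] ++ PySem.List.slice cs none (some (-1))))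
            else st) st
      else st)
    (PySem.Set.add PySem.Set.empty barcode)

-- ===== PORT B =====
-- bases.replace(c, "") is exactly pvBases.filter (· ≠ c): the alphabet has
-- distinct characters, so replace removes at most the one occurrence of c.
def pvVariants (head : String) (left right : List Char) (pre rest : List Char) : List String :=
  match rest with
  | [] => []
  | c :: tail =>
    (if pvBases.contains c then
       (pvBases.filter (fun b => b ≠ c)).flatMap (fun b =>
         [String.ofList (pre ++ [b] ++ tail), head,
          String.ofList (left ++ [b]), String.ofList ([b] ++ right)])
     else []) ++ pvVariants head left right (pre ++ [c]) tail

def barcodeSet_alt (barcode : String) : List String :=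
  let cs := barcode.toList
  let head := String.ofList (PySem.List.slice cs none (some 5))
  let left := PySem.List.slice cs (some 1) none
  let right := PySem.List.slice cs none (some (-1))
  PySem.Set.update (PySem.Set.ofList [barcode]) (pvVariants head left right [] cs)

-- ===== PRECONDITION & SPEC =====
def Spec_barcodeSet (barcode : String) (out : List String) : Prop := out = barcodeSet_alt barcode
instance (barcode : String) (out : List String) : Decidable (Spec_barcodeSet barcode out) := by unfold Spec_barcodeSet; infer_instance

-- ===== CLAIM (what is proved, stated in full; the proofs are below) =====
def Claim_equal_barcodeSet : Prop := ∀ (barcode : String), Dom_barcodeSet barcode → Spec_barcodeSet barcode (barcodeSet barcode)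

-- ===== LEMMAS AND PROOFS =====

-- A's outer-loop body over one enumerated position (proof helper, definitionally A's lambda)
def pvAbody (cs : List Char) (st : PySem.Set String) (ic : Int × Char) : PySem.Set String :=
  if pvBases.contains ic.2 then
    pvBases.foldl
      (fun st b =>
        if ic.2 ≠ b then
          PySem.Set.add (PySem.Set.add (PySem.Set.add (PySem.Set.add st
            (String.ofList (PySem.List.slice cs none (some ic.1) ++ [b] ++
               PySem.List.slice cs (some (ic.1 + 1)) none)))
            (String.ofList (PySem.List.slice cs (some 0) (some 5))))
            (String.ofList (PySem.List.slice cs (some 1) none ++ [b])))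
            (String.ofList ([b] ++ PySem.List.slice cs none (some (-1))))
        else st) st
  else st

-- A's four chained adds over the guarded alphabet equal folding Set.add over
-- B's flat quadruples generated from the pre-filtered alphabet
lemma pv_inner (c : Char) (sub : Char → List Char) (head : String) (left right : List Char)
    (bs : List Char) (st : PySem.Set String) :
    bs.foldl
      (fun st b =>
        if c ≠ b then
          PySem.Set.add (PySem.Set.add (PySem.Set.add (PySem.Set.add st
            (String.ofList (sub b))) head)
            (String.ofList (left ++ [b])))
            (String.ofList ([b] ++ right))
        else st) st
    = ((bs.filter (fun b => b ≠ c)).flatMap (fun b =>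
        [String.ofList (sub b), head,
         String.ofList (left ++ [b]), String.ofList ([b] ++ right)])).foldl PySem.Set.add st := by
  induction bs generalizing st with
  | nil => rfl
  | cons b bs ih =>
    simp only [List.foldl_cons, List.filter_cons]
    by_cases h : c = b
    · subst h
      simp only [ne_eq, not_true_eq_false, if_false, decide_false]
      exact ih st
    · have hb : b ≠ c := fun hbc => h hbc.symm
      simp only [ne_eq, h, not_false_eq_true, if_true, hb, decide_true,
        List.flatMap_cons, List.foldl_append, List.foldl_cons, List.foldl_nil]
      exact ih _

-- main correspondence: A's fold over the enumerated rest (started at the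
-- prefix length) equals folding Set.add over B's recursively generated stream
lemma pv_main (cs pre rest : List Char) (h : cs = pre ++ rest) (st : PySem.Set String) :
    (PySem.List.enumerate rest (pre.length : Int)).foldl (pvAbody cs) st
    = (pvVariants (String.ofList (PySem.List.slice cs none (some 5)))
        (PySem.List.slice cs (some 1) none)
        (PySem.List.slice cs none (some (-1))) pre rest).foldl PySem.Set.add st := by
  induction rest generalizing pre st with
  | nil => simp [PySem.List.enumerate_nil, pvVariants]
  | cons c tail ih =>
    rw [PySem.List.enumerate_cons]
    simp only [List.foldl_cons, pvVariants]
    have hcast : (pre.length : Int) + 1 = ((pre.length + 1 : Nat) : Int) := by push_cast; ring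
    have htake : PySem.List.slice cs none (some (pre.length : Int)) = pre := by
      rw [PySem.List.slice_to_natCast, h, List.take_left]
    have hdrop : PySem.List.slice cs (some ((pre.length : Int) + 1)) none = tail := by
      rw [hcast, PySem.List.slice_from_natCast, h]
      simp
    have hnext : (pre.length : Int) + 1 = ((pre ++ [c]).length : Int) := by
      simp [List.length_append]
    have hrec := ih (pre ++ [c]) (by simp [h])
    by_cases hc : pvBases.contains c = true
    · have hA : pvAbody cs st ((pre.length : Int), c)
          = ((pvBases.filter (fun b => b ≠ c)).flatMap (fun b =>
              [String.ofList (pre ++ [b] ++ tail),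
               String.ofList (PySem.List.slice cs none (some 5)),
               String.ofList (PySem.List.slice cs (some 1) none ++ [b]),
               String.ofList ([b] ++ PySem.List.slice cs none (some (-1)))])).foldl PySem.Set.add st := by
        unfold pvAbody
        simp only [hc, if_true, PySem.List.slice_zero_start, htake, hdrop]
        exact pv_inner c (fun b => pre ++ [b] ++ tail) _ _ _ pvBases st
      rw [hnext, hrec, if_pos hc, List.foldl_append, hA]
    · have hA : pvAbody cs st ((pre.length : Int), c) = st := by
        unfold pvAbody; rw [if_neg hc]
      rw [hnext, hrec, hA, if_neg hc]
      rfl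

theorem pv_equal (barcode : String) : barcodeSet barcode = barcodeSet_alt barcode := by
  show (PySem.List.enumerate barcode.toList 0).foldl (pvAbody barcode.toList)
        (PySem.Set.add PySem.Set.empty barcode)
      = barcodeSet_alt barcode
  have h0 : (0 : Int) = ((List.length ([] : List Char) : Nat) : Int) := by simp
  rw [h0, pv_main barcode.toList [] barcode.toList rfl]
  rfl

-- ===== VERDICT (by name: the statement is the Claim_ definition above) =====
theorem barcodeSet_spec : Claim_equal_barcodeSet := by
  intro barcode _
  show barcodeSet barcode = barcodeSet_alt barcode
  exact pv_equal barcode
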